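-- pv_equiv track=rewrite | github.com/kjh2623jh/study | algorithm/programmers/괄호 변환.py | solution
-- ===== SOURCE A (Python) =====
-- def solution(p):
--     if p == '':
--         return ''
--     check = 0
--     check2 = 0
--     for i in range(len(p)):
--         check += 1 if p[i]=='(' else -1
--         if check < 0:
--             check2 = 1
--         if not check: break
--     u=p[:i+1]
--     v=p[i+1:]
--     if check2:
--         return f"({solution(v)}){u[1:-1].replace('(','temp').replace(')','(').replace('temp',')')}"
--     return f"{u}{solution(v)}"
-- ===== SOURCE B (Python) =====
-- def solution(p):
--     # Iterative segment consumption with a builder list; the scan is index-based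
--     # (no re-slicing per step) and recursion happens only for an unbalanced segment.
--     out = []
--     n = len(p)
--     pos = 0
--     while pos < n:
--         bal = 0
--         bad = False
--         j = pos
--         while j < n:
--             bal += 1 if p[j] == '(' else -1
--             if bal < 0:
--                 bad = True
--             j += 1
--             if bal == 0:
--                 break
--         if bad:
--             inner = solution(p[j:])
--             mid = p[pos + 1:j - 1].replace('(', 'temp').replace(')', '(').replace('temp', ')')
--             out.append('(' + inner + ')' + mid)
--             break
--         out.append(p[pos:j])
--         pos = j
--     return ''.join(out)
-- ===== Notes on version B (the rewrite author's own statement) =====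
-- stated objective: alternative
-- what changed: A re-slices the string and recurses for every balanced segment; B walks the string with an index-based inner scan and consumes balanced segments in an iterative outer loop with a builder list, recursing only on an unbalanced segment.
import Mathlib
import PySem

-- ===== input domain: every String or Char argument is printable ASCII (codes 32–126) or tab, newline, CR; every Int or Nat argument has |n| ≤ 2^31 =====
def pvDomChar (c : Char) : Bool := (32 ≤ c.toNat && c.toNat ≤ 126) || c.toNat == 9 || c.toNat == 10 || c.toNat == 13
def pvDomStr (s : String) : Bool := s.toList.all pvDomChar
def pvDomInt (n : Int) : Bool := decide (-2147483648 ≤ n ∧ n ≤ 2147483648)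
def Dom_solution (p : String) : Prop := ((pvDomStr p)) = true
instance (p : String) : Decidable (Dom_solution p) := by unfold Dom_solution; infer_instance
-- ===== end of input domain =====

-- B replaces A's slice-and-recurse on every balanced segment by an iterative
-- index-based scan with a builder list (recursion only for an unbalanced segment);
-- same return value, different structure.


-- ===== PORT A =====

-- .replace('(','temp').replace(')','(').replace('temp',')')  (both Pythons contain this very chain)
def pyFlip (u : List Char) : List Char :=
  PySem.Chars.replace
    (PySem.Chars.replace (PySem.Chars.replace u ['('] ['t','e','m','p']) [')'] ['('])
    ['t','e','m','p'] [')']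

-- A's for-loop: returns (i+1 when the loop stops, check2); cnt counts processed chars
def scanA : List Char → Int → Bool → Nat → Nat × Bool
  | [], _, check2, cnt => (cnt, check2)
  | c :: rest, check, check2, cnt =>
    let check' := check + (if c = '(' then 1 else -1)
    let check2' := if check' < 0 then true else check2
    if check' = 0 then (cnt + 1, check2') else scanA rest check' check2' (cnt + 1)

-- A's recursion, made total with fuel (fuel ≥ length + 1 is always enough)
def solA : Nat → List Char → List Char
  | 0, _ => []
  | fuel + 1, p =>
    if p = [] then []
    else
      let r := scanA p 0 false 0
      let u := PySem.List.slice p none (some (r.1 : Int))       -- p[:i+1]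
      let v := PySem.List.slice p (some (r.1 : Int)) none       -- p[i+1:]
      if r.2 then '(' :: solA fuel v ++ ')' :: pyFlip (PySem.List.slice u (some 1) (some (-1)))
      else u ++ solA fuel v

def solution (p : String) : String := String.ofList (solA (p.toList.length + 1) p.toList)

-- ===== PORT B =====

-- B's inner while: index-based scan from j, returns (stop index, bad flag)
def scanB (p : List Char) (n j : Nat) (bal : Int) (bad : Bool) : Nat × Bool :=
  if _h : j < n then
    let c := PySem.List.pyGetD p (j : Int) ' '                  -- p[j], always in range here
    let bal' := bal + (if c = '(' then 1 else -1)
    let bad' := if bal' < 0 then true else bad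
    if bal' = 0 then (j + 1, bad') else scanB p n (j + 1) bal' bad'
  else (j, bad)
termination_by n - j

-- B's outer while over segments, with the builder list `out`; the recursive
-- call solution(p[j:]) is the fuel-ed self-call on the rest (joined at the end)
def goB : Nat → List Char → Nat → Nat → List (List Char) → List (List Char)
  | 0, _, _, _, out => out
  | fuel + 1, p, n, pos, out =>
    if pos < n then
      let r := scanB p n pos 0 false
      if r.2 then
        let rest := PySem.List.slice p (some (r.1 : Int)) none  -- p[j:]
        let inner := (goB fuel rest rest.length 0 []).flatten   -- solution(p[j:])
        let mid := pyFlip (PySem.List.slice p (some ((pos : Int) + 1)) (some ((r.1 : Int) - 1)))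
        out ++ ['(' :: inner ++ ')' :: mid]
      else goB fuel p n r.1 (out ++ [PySem.List.slice p (some (pos : Int)) (some (r.1 : Int))])
    else out

def solution_alt (p : String) : String :=
  String.ofList ((goB (p.toList.length + 1) p.toList p.toList.length 0 []).flatten)

-- ===== PRECONDITION & SPEC =====
def Spec_solution (p : String) (out : String) : Prop := out = solution_alt p
instance (p : String) (out : String) : Decidable (Spec_solution p out) := by unfold Spec_solution; infer_instance

-- ===== CLAIM (what is proved, stated in full; the proofs are below) =====
def Claim_equal_solution : Prop := ∀ (p : String), Dom_solution p → Spec_solution p (solution p)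

-- ===== LEMMAS AND PROOFS =====

-- the counter argument of scanA only shifts the returned index
lemma scanA_shift (cs : List Char) : ∀ ch b cnt, scanA cs ch b cnt =
    (cnt + (scanA cs ch b 0).1, (scanA cs ch b 0).2) := by
  induction cs with
  | nil => intro ch b cnt; simp [scanA]
  | cons c rest ih =>
    intro ch b cnt
    by_cases h : ch + (if c = '(' then 1 else -1) = 0
    · simp [scanA, h]
    · simp only [scanA, if_neg h]
      rw [ih _ _ (cnt + 1), ih _ _ (0 + 1)]
      refine Prod.ext ?_ ?_
      · dsimp only; omega
      · rfl

lemma scanA_ge (cs : List Char) : ∀ ch b cnt, cnt ≤ (scanA cs ch b cnt).1 := by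
  induction cs with
  | nil => intro ch b cnt; simp [scanA]
  | cons c rest ih =>
    intro ch b cnt
    by_cases h : ch + (if c = '(' then 1 else -1) = 0
    · simp [scanA, h]
    · simp only [scanA, if_neg h]
      exact le_trans (Nat.le_succ cnt) (ih _ _ (cnt + 1))

lemma scanA_le (cs : List Char) : ∀ ch b cnt, (scanA cs ch b cnt).1 ≤ cnt + cs.length := by
  induction cs with
  | nil => intro ch b cnt; simp [scanA]
  | cons c rest ih =>
    intro ch b cnt
    by_cases h : ch + (if c = '(' then 1 else -1) = 0
    · simp [scanA, h]
    · simp only [scanA, if_neg h]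
      have := ih (ch + (if c = '(' then 1 else -1))
        (if ch + (if c = '(' then 1 else -1) < 0 then true else b) (cnt + 1)
      simp only [List.length_cons]
      omega

lemma scanA_ge_one (c : Char) (rest : List Char) (ch : Int) (b : Bool) :
    1 ≤ (scanA (c :: rest) ch b 0).1 := by
  by_cases h : ch + (if c = '(' then 1 else -1) = 0
  · simp [scanA, h]
  · simp only [scanA, if_neg h]
    exact scanA_ge rest _ _ 1

-- fuel irrelevance for solA (any fuel above the length computes the same value)
lemma solA_fuel : ∀ (L : Nat) (p : List Char), p.length ≤ L →
    ∀ f g, p.length < f → p.length < g → solA f p = solA g p := by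
  intro L
  induction L with
  | zero =>
    intro p hp f g hf hg
    have : p = [] := List.eq_nil_of_length_eq_zero (Nat.le_zero.mp hp)
    subst this
    cases f with
    | zero => omega
    | succ f => cases g with
      | zero => omega
      | succ g => simp [solA]
  | succ L ih =>
    intro p hp f g hf hg
    cases f with
    | zero => omega
    | succ f =>
      cases g with
      | zero => omega
      | succ g =>
        by_cases hp0 : p = []
        · simp [solA, hp0]
        · simp only [solA, if_neg hp0, PySem.List.slice_from_natCast]
          have hk : 1 ≤ (scanA p 0 false 0).1 := by
            obtain ⟨c, rest, rfl⟩ := List.exists_cons_of_ne_nil hp0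
            exact scanA_ge_one c rest 0 false
          have hp1 : 0 < p.length := List.length_pos_of_ne_nil hp0
          have hv := ih (p.drop (scanA p 0 false 0).1) (by simp [List.length_drop]; omega)
            f g (by simp [List.length_drop]; omega) (by simp [List.length_drop]; omega)
          rw [hv]

-- B's index scan computes A's for-loop, shifted by the start index
lemma scanB_eq (p : List Char) : ∀ (m j : Nat) (bal : Int) (bad : Bool),
    p.length - j ≤ m → j ≤ p.length →
    scanB p p.length j bal bad =
      (j + (scanA (p.drop j) bal bad 0).1, (scanA (p.drop j) bal bad 0).2) := by
  intro m
  induction m with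
  | zero =>
    intro j bal bad hm hj
    have hj' : j = p.length := by omega
    subst hj'
    simp [scanB, scanA, List.drop_length]
  | succ m ih =>
    intro j bal bad hm hj
    by_cases h : j < p.length
    · rw [scanB]
      simp only [dif_pos h]
      have hc : PySem.List.pyGetD p (j : Int) ' ' = p[j] := by
        simp [PySem.List.pyGetD_natCast, List.getD_eq_getElem?_getD, h]
      have hdrop : p.drop j = p[j] :: p.drop (j + 1) := List.drop_eq_getElem_cons h
      rw [hc, hdrop]
      by_cases h0 : bal + (if p[j] = '(' then 1 else -1) = 0
      · simp [scanA, h0]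
      · simp only [scanA, if_neg h0]
        rw [ih (j + 1) _ _ (by omega) (by omega)]
        rw [scanA_shift (p.drop (j + 1)) _ _ (0 + 1)]
        refine Prod.ext ?_ ?_
        · dsimp only; omega
        · rfl
    · have hj' : j = p.length := by omega
      subst hj'
      simp [scanB, scanA, List.drop_length]

-- the heart: B's segment loop accumulates exactly A's recursion
lemma goB_eq : ∀ (fuel : Nat) (p : List Char) (pos : Nat) (out : List (List Char)),
    pos ≤ p.length → p.length - pos < fuel →
    (goB fuel p p.length pos out).flatten =
      out.flatten ++ solA (p.length - pos + 1) (p.drop pos) := by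
  intro fuel
  induction fuel with
  | zero => intro p pos out h1 h2; omega
  | succ fuel ih =>
    intro p pos out hpos hfuel
    by_cases h : pos < p.length
    · rw [goB]
      simp only [if_pos h]
      rw [scanB_eq p (p.length - pos) pos 0 false (by omega) (by omega)]
      dsimp only
      have hdropne : p.drop pos ≠ [] := by
        simp [List.drop_eq_nil_iff]; omega
      set s := scanA (p.drop pos) 0 false 0 with hs
      have hk1 : 1 ≤ s.1 := by
        obtain ⟨c, rest, hcr⟩ := List.exists_cons_of_ne_nil hdropne
        rw [hs, hcr]; exact scanA_ge_one c rest 0 false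
      have hkle : s.1 ≤ p.length - pos := by
        have := scanA_le (p.drop pos) 0 false 0
        rw [← hs] at this
        simpa [List.length_drop] using this
      have hsolA : solA (p.length - pos + 1) (p.drop pos) =
          if s.2 then '(' :: solA (p.length - pos) (p.drop (pos + s.1)) ++
              ')' :: pyFlip (PySem.List.slice ((p.drop pos).take s.1) (some 1) (some (-1)))
          else (p.drop pos).take s.1 ++ solA (p.length - pos) (p.drop (pos + s.1)) := by
        rw [solA]
        simp only [if_neg hdropne, ← hs, PySem.List.slice_to_natCast,
          PySem.List.slice_from_natCast, List.drop_drop]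
      rw [hsolA]
      have hlen3 : (p.drop (pos + s.1)).length = p.length - (pos + s.1) := by
        simp [List.length_drop]
      have hfuel2 : solA (p.length - pos) (p.drop (pos + s.1)) =
          solA (p.length - (pos + s.1) + 1) (p.drop (pos + s.1)) :=
        solA_fuel p.length _ (by rw [hlen3]; omega) _ _
          (by rw [hlen3]; omega) (by rw [hlen3]; omega)
      by_cases hb : s.2 = true
      · rw [if_pos hb, if_pos hb]
        have hrest : PySem.List.slice p (some ((pos + s.1 : Nat) : Int)) none
            = p.drop (pos + s.1) := PySem.List.slice_from_natCast p (pos + s.1)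
        rw [hrest]
        have hinner := ih (p.drop (pos + s.1)) 0 [] (by omega)
          (by simp [List.length_drop]; omega)
        simp only [List.drop_zero, Nat.sub_zero,
          List.flatten_nil, List.nil_append] at hinner
        rw [hinner]
        have hmid : PySem.List.slice p (some ((pos : Int) + 1))
              (some (((pos + s.1 : Nat) : Int) - 1)) =
            PySem.List.slice ((p.drop pos).take s.1) (some 1) (some (-1)) := by
          have h1 : ((pos : Int) + 1) = ((pos + 1 : Nat) : Int) := by push_cast; ring
          have h2 : (((pos + s.1 : Nat) : Int) - 1) = ((pos + s.1 - 1 : Nat) : Int) := by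
            omega
          have hu : ((p.drop pos).take s.1).length = s.1 := by
            simp [List.length_take, List.length_drop]; omega
          have hmin : min s.1 (p.length - pos) = s.1 := Nat.min_eq_left hkle
          have hclamp : PySem.List.clampIdx s.1 1 = 1 := by
            rw [show (1 : Int) = ((1 : Nat) : Int) from rfl, PySem.List.clampIdx_natCast]
            omega
          have h3 : PySem.List.slice ((p.drop pos).take s.1) (some 1) (some (-1)) =
              (((p.drop pos).take s.1).drop 1).take (s.1 - 1 - 1) := by
            simp only [PySem.List.slice, List.length_take, List.length_drop,
              PySem.List.clampIdx_neg_one, hmin, hclamp]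
          rw [h1, h2, PySem.List.slice_natCast, h3,
            List.drop_take, List.take_take, List.drop_drop]
          congr 1
          omega
        rw [hmid]
        simp [List.flatten_append, hfuel2]
      · rw [if_neg hb, if_neg hb]
        have hu : PySem.List.slice p (some ((pos : Nat) : Int)) (some ((pos + s.1 : Nat) : Int)) =
            (p.drop pos).take s.1 := by
          rw [PySem.List.slice_natCast]; congr 1; omega
        rw [hu, ih p (pos + s.1) _ (by omega) (by omega)]
        simp [List.flatten_append, hfuel2]
    · have : pos = p.length := by omega
      subst this
      rw [goB]
      simp [List.drop_length, solA]

-- ===== VERDICT (by name: the statement is the Claim_ definition above) =====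
theorem solution_spec : Claim_equal_solution := by
  intro p _
  unfold Spec_solution solution solution_alt
  have h := goB_eq (p.toList.length + 1) p.toList 0 [] (by omega) (by omega)
  simp only [List.drop_zero, Nat.sub_zero, List.flatten_nil, List.nil_append] at h
  rw [h]
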